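-- pv_equiv track=rewrite | github.com/HongDaeYong/codingStudy | tobby/9.binaryS/02.py | solution
-- ===== SOURCE A (Python) =====
-- def solution(n, times):
--     answer = 0;
--     times.sort();
--     start = 0;
--     end = n * times[len(times) - 1];
--
--     while start <= end :
--         mid = int((end + start) / 2);
--         s = sum(int(mid / t) for t in times)
--
--         if s >= n :
--             end = mid -1;
--             answer = mid;
--         else :
--             start = mid +1;
--
--     return answer;
-- ===== SOURCE B (Python) =====
-- def solution(n, times):
--     # Discrete-event simulation instead of a binary search over answers:
--     # jump straight to a moment `start` by which at most n-1 people are served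
--     # (exact fraction arithmetic over a common denominator), then serve the
--     # remaining few one by one, always at the queue that completes next.
--     times.sort()
--     if n <= 0:
--         return 0
--     den = 1
--     for t in times:
--         den *= t
--     num = sum(den // t for t in times)
--     start = max(0, (n - 1) * den // num)
--     heap = [((start // t + 1) * t, t) for t in times]
--     ans = 0
--     for _ in range(n - sum(start // t for t in times)):
--         cur, t = min(heap)
--         heap.remove((cur, t))
--         heap.append((cur + t, t))
--         ans = cur
--     return ans
-- ===== Notes on version B (the rewrite author's own statement) =====
-- stated objective: alternative
-- what changed: Replaces the float-midpoint binary search over candidate answers by a discrete-event simulation of the queues: an exact-arithmetic warm start (a common-denominator bound serving at most n-1 people) followed by popping the smallest (next completion, period) pair for the remaining few people; the answer is the last popped completion time.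
-- outside the precondition, e.g. on solution(1, [-2]): A returns 0, B returns -2; on solution(4194304, [2147483648]): A returns 9007199254740992, B returns 9007199254740992
import Mathlib
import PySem

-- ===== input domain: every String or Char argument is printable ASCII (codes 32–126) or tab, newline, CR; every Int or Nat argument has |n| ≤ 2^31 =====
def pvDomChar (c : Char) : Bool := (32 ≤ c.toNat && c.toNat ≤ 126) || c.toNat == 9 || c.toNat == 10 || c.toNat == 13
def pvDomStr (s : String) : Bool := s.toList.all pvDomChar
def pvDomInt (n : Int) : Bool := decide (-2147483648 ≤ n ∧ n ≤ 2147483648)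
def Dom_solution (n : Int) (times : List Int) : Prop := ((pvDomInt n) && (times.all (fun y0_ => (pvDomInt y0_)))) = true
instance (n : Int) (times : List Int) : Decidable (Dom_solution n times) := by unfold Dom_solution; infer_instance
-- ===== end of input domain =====

-- B replaces A's binary search over answers by a discrete-event simulation of the queues
-- (alternative algorithm, not claimed faster); like A, B sorts `times` in place.

-- ===== PORT A =====
-- while start <= end: mid = int((end+start)/2); s = sum(int(mid/t) for t in times); ...
-- On Pre_ (all periods positive, n*t ≤ 2^52) every float division in A is exact and
-- truncation equals floor, so int(x/y) is ported as PySem.Int.floordiv.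
def solutionGo (n : Int) (ts : List Int) (answer start e : Int) : Int :=
  if h : start ≤ e then
    let mid := PySem.Int.floordiv (e + start) 2
    let s := (ts.map (fun t => PySem.Int.floordiv mid t)).sum
    if n ≤ s then solutionGo n ts mid start (mid - 1)
    else solutionGo n ts answer (mid + 1) e
  else answer
termination_by (e + 1 - start).toNat
decreasing_by
  all_goals
    have hb := PySem.Int.floordiv_two_mid_bounds h
    rw [Int.add_comm] at hb
    omega

def solution (n : Int) (times : List Int) : Int :=
  let ts := PySem.List.sorted times (fun x => x) false
  match PySem.List.pyGet? ts ((ts.length : Int) - 1) with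
  | none => 0   -- times = []: Python raises IndexError here; excluded by Pre_
  | some last => solutionGo n ts 0 0 (n * last)

-- ===== PORT B =====
-- Source B: warm start (serve at most n-1 people in closed form over the common
-- denominator den = prod(times)), then pop the remaining few one by one.
-- cur, t = min(heap): lexicographically smallest pair (linear scan, as in Source B)
def heapMin (h : List (Int × Int)) : Option (Int × Int) :=
  h.foldl (fun acc p =>
    match acc with
    | none => some p
    | some q => if p.1 < q.1 ∨ (p.1 = q.1 ∧ p.2 < q.2) then some p else some q) none

def altGo : Nat → List (Int × Int) → Int → Int
  | 0, _, ans => ans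
  | Nat.succ k, h, ans =>
    match heapMin h with
    | none => ans   -- min([]) raises ValueError in Python; excluded by Pre_
    | some p => altGo k ((h.erase p) ++ [(p.1 + p.2, p.2)]) p.1

def solution_alt (n : Int) (times : List Int) : Int :=
  let ts := PySem.List.sorted times (fun x => x) false
  if n ≤ 0 then 0
  else
    let den := ts.foldl (· * ·) 1
    let num := (ts.map (fun t => PySem.Int.floordiv den t)).sum
    let start := max 0 (PySem.Int.floordiv ((n - 1) * den) num)
    let heap := ts.map (fun t => ((PySem.Int.floordiv start t + 1) * t, t))
    altGo (n - (ts.map (fun t => PySem.Int.floordiv start t)).sum).toNat heap 0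

-- ===== PRECONDITION & SPEC =====
-- Pre_ excludes: empty times (A raises IndexError); a zero period whenever A's loop runs
-- (ZeroDivisionError); negative periods when they can steer the search (n >= 1, or n < 0
-- with no positive period) — a corner where A's value is an artefact of the search range
-- end = n*times[-1] and of float truncation toward zero; and, for n >= 1, products n*t
-- beyond 2^52, where A's float divisions int((end+start)/2) and int(mid/t) leave exact
-- integer arithmetic and the search usually loops forever.
def Pre_solution (n : Int) (times : List Int) : Prop :=
  times ≠ [] ∧
    ((1 ≤ n ∧ ∀ t ∈ times, 0 < t ∧ n * t ≤ 4503599627370496)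
      ∨ (n = 0 ∧ (0 : Int) ∉ times)
      ∨ (n < 0 ∧ ∃ t ∈ times, 0 < t))
instance (n : Int) (times : List Int) : Decidable (Pre_solution n times) := by
  unfold Pre_solution; infer_instance
def pvWitness_solution : Int × List Int := (3, [1, 2])

def Spec_solution (n : Int) (times : List Int) (out : Int) : Prop := out = solution_alt n times
instance (n : Int) (times : List Int) (out : Int) : Decidable (Spec_solution n times out) := by
  unfold Spec_solution; infer_instance

-- ===== CLAIM (what is proved, stated in full; the proofs are below) =====
def Claim_equal_solution : Prop := ∀ (n : Int) (times : List Int), Dom_solution n times → Pre_solution n times → Spec_solution n times (solution n times)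

-- ===== LEMMAS AND PROOFS =====

-- feasibility count: S ts T = sum(int(T/t) for t in ts) in exact arithmetic
def pvS (ts : List Int) (T : Int) : Int := (ts.map (fun t => PySem.Int.floordiv T t)).sum

lemma fd_mono {t : Int} (ht : 0 < t) {a b : Int} (hab : a ≤ b) :
    PySem.Int.floordiv a t ≤ PySem.Int.floordiv b t := by
  rw [PySem.Int.floordiv_eq_ediv_of_pos ht, PySem.Int.floordiv_eq_ediv_of_pos ht]
  exact Int.ediv_le_ediv ht hab

lemma ediv_pred {t c : Int} (ht : 0 < t) (hd : t ∣ c) : (c - 1) / t = c / t - 1 := by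
  obtain ⟨k, rfl⟩ := hd
  have h1 : t * k - 1 = (t - 1) + t * (k - 1) := by ring
  rw [h1, Int.add_mul_ediv_left _ _ (by omega : t ≠ 0),
      Int.ediv_eq_zero_of_lt (by omega) (by omega),
      Int.mul_ediv_cancel_left _ (by omega : t ≠ 0)]
  omega

lemma ediv_sub_self {t c : Int} (ht : 0 < t) (hd : t ∣ c) : (c - t) / t = c / t - 1 := by
  obtain ⟨k, rfl⟩ := hd
  have h1 : t * k - t = t * (k - 1) := by ring
  rw [h1, Int.mul_ediv_cancel_left _ (by omega : t ≠ 0),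
      Int.mul_ediv_cancel_left _ (by omega : t ≠ 0)]

lemma fd_pred {t c : Int} (ht : 0 < t) (hd : t ∣ c) :
    PySem.Int.floordiv (c - 1) t = c / t - 1 := by
  rw [PySem.Int.floordiv_eq_ediv_of_pos ht]; exact ediv_pred ht hd

lemma fd_sub_self {t c : Int} (ht : 0 < t) (hd : t ∣ c) :
    PySem.Int.floordiv (c - t) t = c / t - 1 := by
  rw [PySem.Int.floordiv_eq_ediv_of_pos ht]; exact ediv_sub_self ht hd

lemma fd_zero {t : Int} (ht : t ≠ 0) : PySem.Int.floordiv 0 t = 0 := by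
  rcases lt_or_gt_of_ne ht with h | h
  · have h1 := PySem.Int.floordiv_mul_add_mod 0 t
    have h2 : PySem.Int.mod 0 t = 0 := (PySem.Int.mod_eq_zero_iff_dvd 0 t).2 (dvd_zero t)
    rw [h2] at h1
    rcases mul_eq_zero.1 (by omega : PySem.Int.floordiv 0 t * t = 0) with h3 | h3
    · exact h3
    · omega
  · rw [PySem.Int.floordiv_eq_ediv_of_pos h, Int.zero_ediv]

lemma pvS_mono {ts : List Int} (hpos : ∀ t ∈ ts, 0 < t) {a b : Int} (hab : a ≤ b) :
    pvS ts a ≤ pvS ts b :=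
  List.sum_le_sum (fun t htm => fd_mono (hpos t htm) hab)

lemma pv_sum_map_neg_one (l : List Int) :
    (l.map (fun _ => (-1 : Int))).sum = -(l.length : Int) := by
  induction l with
  | nil => simp
  | cons a l ih =>
    simp only [List.map_cons, List.sum_cons, List.length_cons, ih]
    push_cast
    omega

lemma pv_sum_map_one (l : List Int) :
    (l.map (fun _ => (1 : Int))).sum = (l.length : Int) := by
  induction l with
  | nil => simp
  | cons a l ih =>
    simp only [List.map_cons, List.sum_cons, List.length_cons, ih]
    push_cast
    omega

lemma pvS_neg {ts : List Int} (hpos : ∀ t ∈ ts, 0 < t) (hne : ts ≠ []) {T : Int}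
    (hT : T < 0) : pvS ts T < 0 := by
  have h1 : pvS ts T ≤ ((ts.map (fun _ => (-1 : Int))).sum) := by
    unfold pvS
    apply List.sum_le_sum
    intro t htm
    have ht := hpos t htm
    have : PySem.Int.floordiv T t < 0 := by
      rw [PySem.Int.floordiv_eq_ediv_of_pos ht]
      exact Int.ediv_neg_of_neg_of_pos hT ht
    omega
  have h2 : (ts.map (fun _ => (-1 : Int))).sum = -(ts.length : Int) :=
    pv_sum_map_neg_one ts
  have h3 : 0 < ts.length := List.length_pos_of_ne_nil hne
  rw [h2] at h1
  omega

lemma pvS_perm {l₁ l₂ : List Int} (h : l₁.Perm l₂) (T : Int) : pvS l₁ T = pvS l₂ T :=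
  (h.map _).sum_eq

-- A's loop computes the least feasible value L
lemma goA (n : Int) (ts : List Int) (hpos : ∀ t ∈ ts, 0 < t) (L : Int)
    (hfeas : n ≤ pvS ts L) (hmin : ∀ T, T < L → ¬ n ≤ pvS ts T) :
    ∀ (k : ℕ) (ans start e : Int), (e + 1 - start).toNat ≤ k →
      (∀ T, T < start → ¬ n ≤ pvS ts T) → (L ≤ e ∨ ans = L) →
      solutionGo n ts ans start e = L := by
  intro k
  induction k with
  | zero =>
    intro ans start e hk hlo hdisj
    rw [solutionGo, dif_neg (by omega)]
    have hstartL : start ≤ L := by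
      by_contra h
      exact hlo L (by omega) hfeas
    rcases hdisj with h | h
    · omega
    · exact h
  | succ k ih =>
    intro ans start e hk hlo hdisj
    by_cases hse : start ≤ e
    · rw [solutionGo, dif_pos hse]
      have hb := PySem.Int.floordiv_two_mid_bounds hse
      rw [Int.add_comm] at hb
      set mid := PySem.Int.floordiv (e + start) 2 with hmid
      dsimp only
      split_ifs with hs
      · -- feasible at mid: answer := mid, e := mid - 1
        have hLmid : L ≤ mid := by
          by_contra h
          exact hmin mid (by omega) hs
        apply ih mid start (mid - 1) (by omega) hlo
        rcases (lt_or_eq_of_le hLmid) with h | h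
        · left; omega
        · right; omega
      · -- infeasible at mid: start := mid + 1
        apply ih ans (mid + 1) e (by omega)
        · intro T hT hfT
          exact hs (le_trans hfT (pvS_mono hpos (by omega)))
        · rcases hdisj with h | h
          · left; exact h
          · right; exact h
    · rw [solutionGo, dif_neg hse]
      have hstartL : start ≤ L := by
        by_contra h
        exact hlo L (by omega) hfeas
      rcases hdisj with h | h
      · omega
      · exact h

-- B-side invariant
def InvB (ts : List Int) (m L : Int) (H : List (Int × Int)) : Prop :=
  (H.map Prod.snd).Perm ts ∧ 0 ≤ L ∧
  (∀ p ∈ H, 0 < p.2 ∧ p.2 ∣ p.1 ∧ p.1 - p.2 ≤ L ∧ L ≤ p.1) ∧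
  (H.map (fun p => p.1 / p.2 - 1)).sum = m

lemma heapMin_go (l : List (Int × Int)) :
    ∀ (q : Int × Int), ∃ r, l.foldl (fun acc p =>
      match acc with
      | none => some p
      | some q => if p.1 < q.1 ∨ (p.1 = q.1 ∧ p.2 < q.2) then some p else some q)
      (some q) = some r ∧ (r ∈ l ∨ r = q) ∧ r.1 ≤ q.1 ∧ ∀ p ∈ l, r.1 ≤ p.1 := by
  induction l with
  | nil => intro q; exact ⟨q, rfl, Or.inr rfl, le_refl _, by simp⟩
  | cons a l ih =>
    intro q
    simp only [List.foldl_cons]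
    by_cases hc : a.1 < q.1 ∨ (a.1 = q.1 ∧ a.2 < q.2)
    · rw [if_pos hc]
      obtain ⟨r, h1, h2, h3, h4⟩ := ih a
      refine ⟨r, h1, ?_, by omega, ?_⟩
      · rcases h2 with h | h
        · exact Or.inl (List.mem_cons_of_mem _ h)
        · exact Or.inl (h ▸ List.mem_cons_self)
      · intro p hp
        rcases List.mem_cons.1 hp with rfl | hp
        · exact h3
        · exact h4 p hp
    · rw [if_neg hc]
      obtain ⟨r, h1, h2, h3, h4⟩ := ih q
      refine ⟨r, h1, ?_, h3, ?_⟩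
      · rcases h2 with h | h
        · exact Or.inl (List.mem_cons_of_mem _ h)
        · exact Or.inr h
      · intro p hp
        rcases List.mem_cons.1 hp with rfl | hp
        · omega
        · exact h4 p hp

lemma heapMin_spec {h : List (Int × Int)} (hne : h ≠ []) :
    ∃ r, heapMin h = some r ∧ r ∈ h ∧ ∀ p ∈ h, r.1 ≤ p.1 := by
  cases h with
  | nil => exact absurd rfl hne
  | cons a l =>
    obtain ⟨r, h1, h2, h3, h4⟩ := heapMin_go l a
    refine ⟨r, ?_, ?_, ?_⟩
    · unfold heapMin; simpa using h1
    · rcases h2 with h | h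
      · exact List.mem_cons_of_mem _ h
      · exact h ▸ List.mem_cons_self
    · intro p hp
      rcases List.mem_cons.1 hp with rfl | hp
      · exact h3
      · exact h4 p hp

lemma popPres (ts : List Int) {m L : Int} {H : List (Int × Int)} {r : Int × Int}
    (inv : InvB ts m L H) (hr : r ∈ H) (hmin : ∀ p ∈ H, r.1 ≤ p.1) :
    InvB ts (m + 1) r.1 ((H.erase r) ++ [(r.1 + r.2, r.2)]) ∧
      (∃ p ∈ (H.erase r) ++ [(r.1 + r.2, r.2)], p.1 - p.2 = r.1) := by
  obtain ⟨hperm, hL0, hel, hsum⟩ := inv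
  have hpermr : H.Perm (r :: H.erase r) := List.perm_cons_erase hr
  obtain ⟨hrpos, hrdvd, hrlo, hrhi⟩ := hel r hr
  refine ⟨⟨?_, by omega, ?_, ?_⟩, ?_⟩
  · have e1 : ((H.erase r ++ [(r.1 + r.2, r.2)]).map Prod.snd)
        = (H.erase r).map Prod.snd ++ [r.2] := by simp
    have p1 : ((H.erase r).map Prod.snd ++ [r.2]).Perm (r.2 :: (H.erase r).map Prod.snd) :=
      List.perm_append_singleton _ _
    have e2 : (r.2 :: (H.erase r).map Prod.snd) = ((r :: H.erase r).map Prod.snd) := by simp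
    have p2 : ((r :: H.erase r).map Prod.snd).Perm (H.map Prod.snd) :=
      (hpermr.map Prod.snd).symm
    rw [e1]
    exact (p1.trans (e2 ▸ p2)).trans hperm
  · intro q hq
    rcases List.mem_append.1 hq with hq | hq
    · have hqH : q ∈ H := List.mem_of_mem_erase hq
      obtain ⟨h1, h2, h3, h4⟩ := hel q hqH
      exact ⟨h1, h2, by omega, hmin q hqH⟩
    · have hq' := List.mem_singleton.1 hq
      subst hq'
      exact ⟨hrpos, dvd_add hrdvd dvd_rfl, by simp, by omega⟩
  · have hnew : (r.1 + r.2) / r.2 = r.1 / r.2 + 1 := by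
      have h := Int.add_mul_ediv_right r.1 1 (by omega : r.2 ≠ 0)
      rw [one_mul] at h
      omega
    have hsplit : (H.map (fun p => p.1 / p.2 - 1)).sum
        = (r.1 / r.2 - 1) + ((H.erase r).map (fun p => p.1 / p.2 - 1)).sum := by
      have := (hpermr.map (fun p : Int × Int => p.1 / p.2 - 1)).sum_eq
      simpa using this
    rw [List.map_append, List.sum_append]
    simp only [List.map_cons, List.map_nil, List.sum_cons, List.sum_nil]
    omega
  · exact ⟨(r.1 + r.2, r.2), List.mem_append_right _ (List.mem_singleton.2 rfl), by simp⟩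

lemma altGoSpec (ts : List Int) (hne : ts ≠ []) :
    ∀ (k : ℕ) (H : List (Int × Int)) (L₀ m L : Int), InvB ts m L H → 1 ≤ k →
      ∃ H', InvB ts (m + k) (altGo k H L₀) H' ∧
        ∃ p ∈ H', p.1 - p.2 = altGo k H L₀ := by
  intro k
  induction k with
  | zero => intro H L₀ m L inv hk; omega
  | succ k ih =>
    intro H L₀ m L inv hk
    have hHne : H ≠ [] := by
      intro h
      rw [h] at inv
      exact hne (List.Perm.nil_eq inv.1).symm
    obtain ⟨r, h1, h2, h3⟩ := heapMin_spec hHne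
    obtain ⟨inv', hwit'⟩ := popPres ts inv h2 h3
    rw [altGo, h1]
    show ∃ H', InvB ts (m + ((k : ℕ) + 1 : ℕ)) (altGo k (H.erase r ++ [(r.1 + r.2, r.2)]) r.1) H' ∧
      ∃ p ∈ H', p.1 - p.2 = altGo k (H.erase r ++ [(r.1 + r.2, r.2)]) r.1
    by_cases hk0 : k = 0
    · subst hk0
      refine ⟨(H.erase r) ++ [(r.1 + r.2, r.2)], ?_, ?_⟩
      · have h4 : m + (((0 : ℕ) + 1 : ℕ) : Int) = m + 1 := by push_cast; ring
        rw [h4]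
        exact inv'
      · exact hwit'
    · obtain ⟨H', inv2, hwit2⟩ := ih _ r.1 _ _ inv' (by omega)
      refine ⟨H', ?_, hwit2⟩
      have h4 : m + 1 + (k : Int) = m + (((k : ℕ) + 1 : ℕ) : Int) := by push_cast; ring
      rwa [h4] at inv2

lemma charB {ts : List Int} {m L : Int} {H : List (Int × Int)}
    (inv : InvB ts m L H) (hwit : ∃ p ∈ H, p.1 - p.2 = L) :
    m ≤ pvS ts L ∧ ∀ T, T < L → pvS ts T < m := by
  obtain ⟨hperm, hL0, hel, hsum⟩ := inv
  have hS : ∀ T, pvS ts T = (H.map (fun p => PySem.Int.floordiv T p.2)).sum := by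
    intro T
    calc pvS ts T = pvS (H.map Prod.snd) T := (pvS_perm hperm T).symm
      _ = (H.map (fun p => PySem.Int.floordiv T p.2)).sum := by
          unfold pvS; rw [List.map_map]; rfl
  constructor
  · rw [hS]
    calc m = (H.map (fun p => p.1 / p.2 - 1)).sum := hsum.symm
      _ ≤ (H.map (fun p => PySem.Int.floordiv L p.2)).sum := by
          apply List.sum_le_sum
          intro p hp
          obtain ⟨h1, h2, h3, h4⟩ := hel p hp
          have := fd_mono h1 h3
          rwa [fd_sub_self h1 h2] at this
  · intro T hT
    obtain ⟨w, hwH, hwdiff⟩ := hwit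
    obtain ⟨hw1, hw2, hw3, hw4⟩ := hel w hwH
    have hpermw : H.Perm (w :: H.erase w) := List.perm_cons_erase hwH
    have hsum' : (H.map (fun p => p.1 / p.2 - 1)).sum
        = (w.1 / w.2 - 1) + ((H.erase w).map (fun p => p.1 / p.2 - 1)).sum := by
      have := (hpermw.map (fun p : Int × Int => p.1 / p.2 - 1)).sum_eq
      simpa using this
    have hST : pvS ts T = PySem.Int.floordiv T w.2
        + ((H.erase w).map (fun p => PySem.Int.floordiv T p.2)).sum := by
      rw [hS]
      have := (hpermw.map (fun p : Int × Int => PySem.Int.floordiv T p.2)).sum_eq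
      simpa using this
    have hwbound : PySem.Int.floordiv T w.2 ≤ w.1 / w.2 - 2 := by
      have hdvd' : w.2 ∣ w.1 - w.2 := (dvd_sub_right hw2).2 dvd_rfl
      have h5 : PySem.Int.floordiv T w.2 ≤ PySem.Int.floordiv (w.1 - w.2 - 1) w.2 :=
        fd_mono hw1 (by omega)
      have h6 : PySem.Int.floordiv (w.1 - w.2 - 1) w.2 = (w.1 - w.2) / w.2 - 1 :=
        fd_pred hw1 hdvd'
      have h7 : (w.1 - w.2) / w.2 = w.1 / w.2 - 1 := ediv_sub_self hw1 hw2
      omega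
    have hrest : ((H.erase w).map (fun p => PySem.Int.floordiv T p.2)).sum
        ≤ ((H.erase w).map (fun p => p.1 / p.2 - 1)).sum := by
      apply List.sum_le_sum
      intro p hp
      obtain ⟨h1, h2, h3, h4⟩ := hel p (List.mem_of_mem_erase hp)
      have h5 : PySem.Int.floordiv T p.2 ≤ PySem.Int.floordiv (p.1 - 1) p.2 :=
        fd_mono h1 (by omega)
      have h6 := fd_pred h1 h2
      omega
    omega

lemma pairwise_le_getLast :
    ∀ (l : List Int) (h : l ≠ []), l.Pairwise (· ≤ ·) → ∀ x ∈ l, x ≤ l.getLast h := by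
  intro l
  induction l with
  | nil => intro h; exact absurd rfl h
  | cons a l ih =>
    intro h hp x hx
    cases l with
    | nil => simp at hx; simp [hx]
    | cons b l' =>
      rw [List.getLast_cons (by simp)]
      rcases List.mem_cons.1 hx with rfl | hx
      · have ha : x ≤ b := (List.pairwise_cons.1 hp).1 b List.mem_cons_self
        have hb := ih (by simp) (List.pairwise_cons.1 hp).2 b List.mem_cons_self
        omega
      · exact ih (by simp) (List.pairwise_cons.1 hp).2 x hx

-- ===== VERDICT (by name: the statement is the Claim_ definition above) =====
theorem solution_spec : Claim_equal_solution := by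
  intro n times hdom hpre
  unfold Spec_solution
  obtain ⟨hne, hpt⟩ := hpre
  set ts := PySem.List.sorted times (fun x => x) false with hts
  have hperm : ts.Perm times := PySem.List.sorted_perm times (fun x => x) false
  have htsne : ts ≠ [] := by
    intro h
    rw [h] at hperm
    exact hne hperm.nil_eq.symm
  have hlen : 0 < ts.length := List.length_pos_of_ne_nil htsne
  have hidx : (ts.length : Int) - 1 = ((ts.length - 1 : Nat) : Int) := by omega
  have hget : PySem.List.pyGet? ts ((ts.length : Int) - 1) = some (ts.getLast htsne) := by
    rw [hidx, PySem.List.pyGet?_natCast, ← List.getLast?_eq_getElem?]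
    exact List.getLast?_eq_some_getLast htsne
  set last := ts.getLast htsne with hlastdef
  have hlast_mem : last ∈ ts := List.getLast_mem htsne
  have hlast_big : ∀ t ∈ ts, t ≤ last := by
    apply pairwise_le_getLast ts htsne
    have h := PySem.List.sorted_pairwise (xs := times) (key := fun x => x)
    simpa [← hts] using h
  have hsolA : solution n times = solutionGo n ts 0 0 (n * last) := by
    show (match PySem.List.pyGet? ts ((ts.length : Int) - 1) with
          | none => 0
          | some l => solutionGo n ts 0 0 (n * l)) = solutionGo n ts 0 0 (n * last)
    rw [hget]
  rcases hpt with ⟨hn, hpt⟩ | ⟨hn0, h0notin⟩ | ⟨hneg, t0, ht0m, ht0p⟩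
  · -- 1 ≤ n, all periods positive and bounded: both sides equal the least feasible L
    have hpos : ∀ t ∈ ts, 0 < t := fun t ht => (hpt t (hperm.mem_iff.1 ht)).1
    have hlastpos : 0 < last := hpos last hlast_mem
    have h0nl : 0 ≤ n * last := mul_nonneg (by omega) (by omega)
    have hfdlast : PySem.Int.floordiv (n * last) last = n := by
      rw [PySem.Int.floordiv_eq_ediv_of_pos hlastpos, Int.mul_ediv_cancel _ (by omega)]
    have hfeasUB : n ≤ pvS ts (n * last) := by
      unfold pvS
      have hmem : PySem.Int.floordiv (n * last) last
          ∈ ts.map (fun t => PySem.Int.floordiv (n * last) t) :=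
        List.mem_map_of_mem hlast_mem
      have hnn : ∀ x ∈ ts.map (fun t => PySem.Int.floordiv (n * last) t), 0 ≤ x := by
        intro x hx
        obtain ⟨t, htm, rfl⟩ := List.mem_map.1 hx
        rw [PySem.Int.floordiv_eq_ediv_of_pos (hpos t htm)]
        exact Int.ediv_nonneg h0nl (le_of_lt (hpos t htm))
      have h := List.single_le_sum hnn _ hmem
      rw [hfdlast] at h
      exact h
    have hex : ∃ k : ℕ, n ≤ pvS ts (k : Int) :=
      ⟨(n * last).toNat, by rwa [Int.toNat_of_nonneg h0nl]⟩
    have hfeasL : n ≤ pvS ts ((Nat.find hex : ℕ) : Int) := Nat.find_spec hex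
    have hminL : ∀ T, T < ((Nat.find hex : ℕ) : Int) → ¬ n ≤ pvS ts T := by
      intro T hT hf
      by_cases hT0 : 0 ≤ T
      · have hTeq : T = ((T.toNat : ℕ) : Int) := (Int.toNat_of_nonneg hT0).symm
        rw [hTeq] at hf
        exact Nat.find_min hex (by omega) hf
      · have := pvS_neg hpos htsne (show T < 0 by omega)
        omega
    have hLub : ((Nat.find hex : ℕ) : Int) ≤ n * last := by
      have h := Nat.find_min' hex (p := fun k => n ≤ pvS ts (k : Int))
        (by rwa [Int.toNat_of_nonneg h0nl] : n ≤ pvS ts (((n * last).toNat : ℕ) : Int))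
      omega
    have hA : solutionGo n ts 0 0 (n * last) = ((Nat.find hex : ℕ) : Int) :=
      goA n ts hpos _ hfeasL hminL ((n * last + 1).toNat) 0 0 (n * last) (by omega)
        (fun T hT hf => absurd hf (by have := pvS_neg hpos htsne hT; omega))
        (Or.inl hLub)
    -- B side: warm start at T0, then the short simulation
    set den := ts.foldl (· * ·) 1 with hden
    have hden_prod : den = ts.prod := hden.trans List.prod_eq_foldl.symm
    have hden_pos : 0 < den := by
      rw [hden_prod]
      exact List.prod_pos hpos
    have hdvd : ∀ t ∈ ts, t ∣ den := by
      intro t ht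
      rw [hden_prod]
      exact List.dvd_prod ht
    set num := (ts.map (fun t => PySem.Int.floordiv den t)).sum with hnum
    have hterm1 : ∀ t ∈ ts, (1 : Int) ≤ PySem.Int.floordiv den t := by
      intro t ht
      rw [PySem.Int.floordiv_eq_ediv_of_pos (hpos t ht)]
      have hc : t * (den / t) = den := Int.mul_ediv_cancel' (hdvd t ht)
      have hpos' : 0 < t * (den / t) := by rw [hc]; exact hden_pos
      rcases mul_pos_iff.1 hpos' with ⟨_, h⟩ | ⟨h, _⟩
      · omega
      · have := hpos t ht; omega
    have hnum_ge : (1 : Int) ≤ num := by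
      have h1 : ((ts.map (fun _ => (1 : Int))).sum) ≤ num :=
        List.sum_le_sum (fun t ht => hterm1 t ht)
      have h2 : (ts.map (fun _ => (1 : Int))).sum = (ts.length : Int) := pv_sum_map_one ts
      have h3 : 0 < ts.length := List.length_pos_of_ne_nil htsne
      rw [h2] at h1
      omega
    set T0 := max 0 (PySem.Int.floordiv ((n - 1) * den) num) with hT0def
    have hT0 : 0 ≤ T0 := le_max_left _ _
    set m0 := (ts.map (fun t => PySem.Int.floordiv T0 t)).sum with hm0def
    have hm0S : m0 = pvS ts T0 := rfl
    have hm0le : m0 ≤ n - 1 := by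
      by_cases hX : PySem.Int.floordiv ((n - 1) * den) num ≤ 0
      · have hT00 : T0 = 0 := max_eq_left hX
        have : m0 = 0 := by
          rw [hm0def, hT00]
          apply List.sum_eq_zero
          intro x hx
          obtain ⟨t, htm, rfl⟩ := List.mem_map.1 hx
          exact fd_zero (by have := hpos t htm; omega)
        omega
      · have hT0X : T0 = PySem.Int.floordiv ((n - 1) * den) num :=
          max_eq_right (by omega)
        have hchain : ∀ t ∈ ts,
            PySem.Int.floordiv T0 t * den ≤ T0 * PySem.Int.floordiv den t := by
          intro t ht
          have ht' := hpos t ht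
          rw [PySem.Int.floordiv_eq_ediv_of_pos ht', PySem.Int.floordiv_eq_ediv_of_pos ht']
          have h1 : T0 / t * t ≤ T0 := Int.ediv_mul_le T0 (by omega)
          have h2 : T0 / t * t * (den / t) ≤ T0 * (den / t) :=
            mul_le_mul_of_nonneg_right h1
              (Int.ediv_nonneg (by omega) (by omega))
          calc T0 / t * den = T0 / t * (t * (den / t)) := by
                rw [Int.mul_ediv_cancel' (hdvd t ht)]
            _ = T0 / t * t * (den / t) := by ring
            _ ≤ T0 * (den / t) := h2
        have hsum1 : (ts.map (fun t => PySem.Int.floordiv T0 t * den)).sum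
            ≤ (ts.map (fun t => T0 * PySem.Int.floordiv den t)).sum :=
          List.sum_le_sum hchain
        have hsum2 : (ts.map (fun t => PySem.Int.floordiv T0 t * den)).sum = m0 * den := by
          rw [hm0def, ← List.sum_map_mul_right]
        have hsum3 : (ts.map (fun t => T0 * PySem.Int.floordiv den t)).sum = T0 * num := by
          rw [hnum, ← List.sum_map_mul_left]
        have hX2 : T0 * num ≤ (n - 1) * den := by
          rw [hT0X, PySem.Int.floordiv_eq_ediv_of_pos (by omega : (0:Int) < num)]
          exact Int.ediv_mul_le _ (by omega)
        have : m0 * den ≤ (n - 1) * den := by omega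
        exact le_of_mul_le_mul_right this hden_pos
    set H0 := ts.map (fun t => ((PySem.Int.floordiv T0 t + 1) * t, t)) with hH0
    have hsolB : solution_alt n times = altGo (n - m0).toNat H0 0 := by
      show (if n ≤ 0 then (0 : Int) else altGo (n - m0).toNat H0 0)
          = altGo (n - m0).toNat H0 0
      rw [if_neg (by omega)]
    have hinv0 : InvB ts m0 T0 H0 := by
      refine ⟨?_, hT0, ?_, ?_⟩
      · rw [hH0, List.map_map]
        have : ts.map (Prod.snd ∘ fun t => ((PySem.Int.floordiv T0 t + 1) * t, t)) =
            ts.map id := List.map_congr_left (fun t _ => rfl)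
        rw [this, List.map_id]
      · intro p hp
        rw [hH0] at hp
        obtain ⟨t, htm, rfl⟩ := List.mem_map.1 hp
        have ht := hpos t htm
        refine ⟨ht, dvd_mul_left t _, ?_, ?_⟩
        · have h1 : PySem.Int.floordiv T0 t * t ≤ T0 := by
            rw [PySem.Int.floordiv_eq_ediv_of_pos ht]
            exact Int.ediv_mul_le T0 (by omega)
          have h2 : (PySem.Int.floordiv T0 t + 1) * t - t = PySem.Int.floordiv T0 t * t := by
            ring
          omega
        · have h1 : T0 < (T0 / t + 1) * t := Int.lt_ediv_add_one_mul_self T0 ht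
          rw [PySem.Int.floordiv_eq_ediv_of_pos ht]
          omega
      · rw [hH0, List.map_map, hm0def]
        apply congrArg List.sum
        apply List.map_congr_left
        intro t htm
        have ht := hpos t htm
        show ((PySem.Int.floordiv T0 t + 1) * t) / t - 1 = PySem.Int.floordiv T0 t
        rw [Int.mul_ediv_cancel _ (by omega : t ≠ 0)]
        omega
    obtain ⟨H', hinv', hwit'⟩ := altGoSpec ts htsne (n - m0).toNat H0 0 m0 T0 hinv0
      (by omega)
    have hcast : m0 + (((n - m0).toNat : ℕ) : Int) = n := by omega
    rw [hcast] at hinv'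
    obtain ⟨hSR, hTR⟩ := charB hinv' hwit'
    have hRL : altGo (n - m0).toNat H0 0 = ((Nat.find hex : ℕ) : Int) := by
      have h1 : ¬ altGo (n - m0).toNat H0 0 < ((Nat.find hex : ℕ) : Int) :=
        fun h => hminL _ h hSR
      have h2 : ¬ ((Nat.find hex : ℕ) : Int) < altGo (n - m0).toNat H0 0 :=
        fun h => absurd hfeasL (by have := hTR _ h; omega)
      omega
    rw [hsolA, hsolB, hA, hRL]
  · -- n = 0, no zero period: A's loop runs once at mid = 0 and answers 0; B serves nobody
    subst hn0
    have h0ts : ∀ t ∈ ts, t ≠ 0 := by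
      intro t ht h
      exact h0notin (hperm.mem_iff.1 (h ▸ ht))
    have hB : solution_alt 0 times = 0 := by
      simp only [solution_alt]
      rw [if_pos (le_refl (0 : Int))]
    rw [hsolA, hB, zero_mul]
    rw [solutionGo, dif_pos (le_refl (0 : Int))]
    have hm2 : PySem.Int.floordiv ((0 : Int) + 0) 2 = 0 := by decide
    dsimp only
    rw [hm2]
    have hsz : (ts.map (fun t => PySem.Int.floordiv 0 t)).sum = 0 := by
      apply List.sum_eq_zero
      intro x hx
      obtain ⟨t, htm, rfl⟩ := List.mem_map.1 hx
      exact fd_zero (h0ts t htm)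
    rw [hsz, if_pos (le_refl (0 : Int)), solutionGo, dif_neg (by omega)]
  · -- n < 0 with a positive period: end = n*times[-1] < 0, A skips the search; B serves nobody
    have hlp : 0 < last := lt_of_lt_of_le ht0p (hlast_big t0 (hperm.mem_iff.2 ht0m))
    have hneg' : n * last < 0 := by
      have h1 : n * last ≤ n * 1 :=
        mul_le_mul_of_nonpos_left (by omega : (1 : Int) ≤ last) (by omega : n ≤ 0)
      omega
    have hB : solution_alt n times = 0 := by
      simp only [solution_alt]
      rw [if_pos (by omega : n ≤ 0)]
    rw [hsolA, hB, solutionGo, dif_neg (by omega)]
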